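-- pv_equiv track=rewrite | github.com/dirtycoder/playground | mobiletyping/main.py | type_on_phone
-- ===== SOURCE A (Python) =====
-- keyboard = {
--     '2': 'abc',
--     '3': 'def',
--     '4': 'ghi',
--     '5': 'jkl',
--     '6': 'mno',
--     '7': 'pqrs',
--     '8': 'tuv',
--     '9': 'wxyz',
--     '0': ' ',
-- }
--
-- def get_keystrokes(char):
--     for key, letters in keyboard.items():
--         if char in letters:
--             return key * (letters.index(char) + 1)
--
-- def type_on_phone(msg):
--     typing = ''
--     for char in msg:
--         press = get_keystrokes(char)
--         if typing.endswith(press[0]):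
--             typing += '_'
--         typing += press
--     return typing
-- ===== SOURCE B (Python) =====
-- # B: run-length decomposition — split the message into maximal runs of characters
-- # sharing the same keypad key, render each run as '_'.join of its keystrokes, and
-- # concatenate the runs (no growing-output endswith test, no per-char keyboard scan).
-- KEYBOARD = {
--     '2': 'abc', '3': 'def', '4': 'ghi', '5': 'jkl', '6': 'mno',
--     '7': 'pqrs', '8': 'tuv', '9': 'wxyz', '0': ' ',
-- }
-- KEY_OF = {c: k for k, letters in KEYBOARD.items() for c in letters}
-- COUNT = {c: i + 1 for letters in KEYBOARD.values() for i, c in enumerate(letters)}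
--
-- def type_on_phone(msg):
--     n = len(msg)
--     pieces = []
--     i = 0
--     while i < n:
--         k = KEY_OF.get(msg[i])
--         j = i + 1
--         while j < n and KEY_OF.get(msg[j]) == k:
--             j += 1
--         pieces.append('_'.join(k * COUNT[c] for c in msg[i:j]))
--         i = j
--     return ''.join(pieces)
-- ===== Notes on version B (the rewrite author's own statement) =====
-- stated objective: alternative
-- what changed: B decomposes the message into maximal runs of same-key characters and renders each run as a '_'.join of its keystrokes (built from inverted KEY_OF/COUNT tables), concatenating the runs, instead of A's single char-by-char pass that scans the keyboard per character and tests the growing output with endswith to insert '_'.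
-- outside the precondition, e.g. on type_on_phone('_'): A raises TypeError, B raises KeyError
import Mathlib
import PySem

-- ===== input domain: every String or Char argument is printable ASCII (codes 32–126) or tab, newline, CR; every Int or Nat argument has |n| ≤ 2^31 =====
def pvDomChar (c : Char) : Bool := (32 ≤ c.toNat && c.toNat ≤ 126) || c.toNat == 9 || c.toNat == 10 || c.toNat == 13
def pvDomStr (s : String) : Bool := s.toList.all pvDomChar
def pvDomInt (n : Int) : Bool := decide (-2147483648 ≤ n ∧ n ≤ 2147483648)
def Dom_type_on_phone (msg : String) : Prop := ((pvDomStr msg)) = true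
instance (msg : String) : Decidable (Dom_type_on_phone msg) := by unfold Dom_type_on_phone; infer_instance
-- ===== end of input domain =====

-- B renders the message run of same-key characters by run, joining each run's keystrokes
-- with '_', instead of A's char-by-char keyboard scan with an endswith test; proved equal on Pre_.

-- ===== PORT A =====
-- keyboard = {'2': 'abc', …}
def pvKeyboard : List (Char × List Char) :=
  [('2', ['a','b','c']), ('3', ['d','e','f']), ('4', ['g','h','i']),
   ('5', ['j','k','l']), ('6', ['m','n','o']), ('7', ['p','q','r','s']),
   ('8', ['t','u','v']), ('9', ['w','x','y','z']), ('0', [' '])]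

-- get_keystrokes: scan keyboard.items(); 'char in letters' and key * (letters.index(char)+1)
def pvGetKeystrokes : List (Char × List Char) → Char → Option (List Char)
  | [], _ => none
  | (k, letters) :: rest, c =>
    if c ∈ letters then some (List.replicate (letters.idxOf c + 1) k)
    else pvGetKeystrokes rest c

-- the for-loop of A; press[0] raises TypeError on None in Python (excluded by Pre_),
-- the port uses getD/headD defaults there
def pvTypeLoopA (typing : List Char) : List Char → List Char
  | [] => typing
  | c :: rest =>
    let press := (pvGetKeystrokes pvKeyboard c).getD []
    let typing' := if PySem.Chars.endswith typing [press.headD '?'] then typing ++ ['_'] else typing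
    pvTypeLoopA (typing' ++ press) rest

def type_on_phone (msg : String) : String :=
  String.mk (pvTypeLoopA [] msg.toList)

-- ===== PORT B =====
-- KEY_OF = {c: k …}, COUNT = {c: i+1 …}: the keyboard inverted once
def pvKeyOf : PySem.Dict Char Char := PySem.Dict.mk
  [('a','2'),('b','2'),('c','2'),('d','3'),('e','3'),('f','3'),
   ('g','4'),('h','4'),('i','4'),('j','5'),('k','5'),('l','5'),
   ('m','6'),('n','6'),('o','6'),('p','7'),('q','7'),('r','7'),('s','7'),
   ('t','8'),('u','8'),('v','8'),('w','9'),('x','9'),('y','9'),('z','9'),(' ','0')]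

def pvCount : PySem.Dict Char Nat := PySem.Dict.mk
  [('a',1),('b',2),('c',3),('d',1),('e',2),('f',3),
   ('g',1),('h',2),('i',3),('j',1),('k',2),('l',3),
   ('m',1),('n',2),('o',3),('p',1),('q',2),('r',3),('s',4),
   ('t',1),('u',2),('v',3),('w',1),('x',2),('y',3),('z',4),(' ',1)]

-- '_'.join(k * COUNT[c] for c in run); k is the run's key (None → '?' default, Pre_-excluded)
def pvRenderRun (k : Option Char) (run : List Char) : List Char :=
  PySem.Chars.join ['_'] (run.map (fun c => List.replicate ((PySem.Dict.get? pvCount c).getD 0) (k.getD '?')))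

-- the outer while: peel off the maximal run sharing the first char's key, render, recurse
def pvLoopB : List Char → List Char
  | [] => []
  | c :: rest =>
    let k := PySem.Dict.get? pvKeyOf c
    pvRenderRun k (c :: rest.takeWhile (fun d => PySem.Dict.get? pvKeyOf d == k)) ++
      pvLoopB (rest.dropWhile (fun d => PySem.Dict.get? pvKeyOf d == k))
  termination_by cs => cs.length
  decreasing_by simpa using Nat.lt_succ_of_le (List.length_dropWhile_le _ _)

def type_on_phone_alt (msg : String) : String :=
  String.mk (pvLoopB msg.toList)

-- ===== PRECONDITION & SPEC =====
-- Pre_ excludes messages containing any character outside the keyboard (uppercase, digits,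
-- punctuation such as '_', control whitespace): there A raises TypeError (subscripting the
-- None that get_keystrokes returns) and B also raises (a KeyError on its COUNT table).
def Pre_type_on_phone (msg : String) : Prop :=
  (msg.toList.all (fun c => c ∈ ['a','b','c','d','e','f','g','h','i','j','k','l','m',
                         'n','o','p','q','r','s','t','u','v','w','x','y','z',' '])) = true
instance (msg : String) : Decidable (Pre_type_on_phone msg) := by unfold Pre_type_on_phone; infer_instance
def pvWitness_type_on_phone : String := "hi om"

def Spec_type_on_phone (msg : String) (out : String) : Prop := out = type_on_phone_alt msg
instance (msg : String) (out : String) : Decidable (Spec_type_on_phone msg out) := by unfold Spec_type_on_phone; infer_instance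

-- ===== CLAIM (what is proved, stated in full; the proofs are below) =====
def Claim_equal_type_on_phone : Prop := ∀ (msg : String), Dom_type_on_phone msg → Pre_type_on_phone msg → Spec_type_on_phone msg (type_on_phone msg)

-- ===== LEMMAS AND PROOFS =====

-- common reference: char-by-char with the previous key threaded explicitly
def pvSpecF (prev : Option Char) : List Char → List Char
  | [] => []
  | c :: cs =>
    (if PySem.Dict.get? pvKeyOf c == prev then ['_'] else []) ++
    List.replicate ((PySem.Dict.get? pvCount c).getD 0) ((PySem.Dict.get? pvKeyOf c).getD '?') ++
    pvSpecF (PySem.Dict.get? pvKeyOf c) cs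

-- per-character coherence of A's lookup with B's two tables
def pvCharOK (c : Char) : Bool :=
  match pvGetKeystrokes pvKeyboard c, PySem.Dict.get? pvKeyOf c, PySem.Dict.get? pvCount c with
  | some p, some k, some m => p == List.replicate m k && decide (0 < m)
  | _, _, _ => false

def pvAlphabet : List Char :=
  ['a','b','c','d','e','f','g','h','i','j','k','l','m',
   'n','o','p','q','r','s','t','u','v','w','x','y','z',' ']

theorem pvCharOK_all : ∀ c ∈ pvAlphabet, pvCharOK c = true := by
  intro c hc; fin_cases hc <;> rfl

theorem endswith_single (l : List Char) (a : Char) :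
    PySem.Chars.endswith l [a] = true ↔ l.getLast? = some a := by
  rw [PySem.Chars.endswith_iff]
  constructor
  · rintro ⟨t, rfl⟩; simp
  · intro h
    rcases l.eq_nil_or_concat with rfl | ⟨t, b, rfl⟩
    · simp at h
    · simp at h
      exact ⟨t, by simp [h]⟩

-- A = pvSpecF: invariant — typing = out whose last char is the previous key (none for empty out)
theorem loopA_spec (cs : List Char) (hcs : ∀ c ∈ cs, c ∈ pvAlphabet)
    (out : List Char) (prev : Option Char)
    (hprev : (out = [] ∧ prev = none) ∨ ∃ h, prev = some h ∧ out.getLast? = some h) :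
    pvTypeLoopA out cs = out ++ pvSpecF prev cs := by
  induction cs generalizing out prev with
  | nil => simp [pvTypeLoopA, pvSpecF]
  | cons c rest ih =>
    have hc := pvCharOK_all c (hcs c (by simp))
    unfold pvCharOK at hc
    rcases hA : pvGetKeystrokes pvKeyboard c with _ | p <;> rw [hA] at hc
    · simp at hc
    rcases hK : PySem.Dict.get? pvKeyOf c with _ | k <;> rw [hK] at hc
    · simp at hc
    rcases hM : PySem.Dict.get? pvCount c with _ | m <;> rw [hM] at hc
    · simp at hc
    simp only [Bool.and_eq_true, beq_iff_eq, decide_eq_true_eq] at hc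
    obtain ⟨hp, hm⟩ := hc
    obtain ⟨m', rfl⟩ : ∃ m', m = m' + 1 := ⟨m - 1, by omega⟩
    have hhead : p.headD '?' = k := by rw [hp]; simp [List.replicate_succ]
    have hlastp : p.getLast? = some k := by
      rw [hp, List.replicate_succ', List.getLast?_append]; simp
    have hne : p ≠ [] := by rw [hp]; simp
    have hcond : PySem.Chars.endswith out [p.headD '?'] = true ↔ (some k = prev) := by
      rw [hhead, endswith_single]
      rcases hprev with ⟨rfl, rfl⟩ | ⟨h, rfl, hl⟩
      · simp
      · rw [hl]; simp [eq_comm]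
    simp only [pvTypeLoopA, hA, Option.getD_some]
    have hrec := ih (fun x hx => hcs x (by simp [hx]))
        ((if PySem.Chars.endswith out [p.headD '?'] then out ++ ['_'] else out) ++ p) (some k)
        (Or.inr ⟨k, rfl, by rw [List.getLast?_append_of_ne_nil _ hne, hlastp]⟩)
    rw [hrec]
    simp only [pvSpecF, hK, hM, hp, Option.getD_some]
    simp only [← hp]
    by_cases h : PySem.Chars.endswith out [p.headD '?'] = true
    · rw [if_pos h, if_pos (by simp [hcond.mp h])]
      simp
    · rw [if_neg h, if_neg (by simp; intro hh; exact h (hcond.mpr hh))]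
      simp
-- helper: join over a cons
theorem join_underscore_cons (x : List Char) (l : List (List Char)) :
    PySem.Chars.join ['_'] (x :: l) = x ++ (l.flatMap (fun y => '_' :: y)) := by
  induction l generalizing x with
  | nil => simp [PySem.Chars.join_singleton]
  | cons y l ih =>
    rw [PySem.Chars.join_cons_cons, ih y]
    simp

-- B = pvSpecF whenever prev differs from the first char's key; strong induction on length
theorem loopB_spec (n : Nat) : ∀ (cs : List Char), cs.length ≤ n →
    (∀ c ∈ cs, c ∈ pvAlphabet) →
    ∀ (prev : Option Char),
    (∀ c, cs.head? = some c → (PySem.Dict.get? pvKeyOf c == prev) = false) →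
    pvLoopB cs = pvSpecF prev cs := by
  induction n with
  | zero =>
    intro cs hlen _ prev _
    have : cs = [] := List.length_eq_zero_iff.mp (Nat.le_zero.mp hlen)
    subst this; simp [pvLoopB, pvSpecF]
  | succ n ih =>
    intro cs hlen hall prev hne
    match cs with
    | [] => simp [pvLoopB, pvSpecF]
    | c :: rest =>
      have hc := pvCharOK_all c (hall c (by simp))
      unfold pvCharOK at hc
      rcases hA : pvGetKeystrokes pvKeyboard c with _ | p <;> rw [hA] at hc
      · simp at hc
      rcases hK : PySem.Dict.get? pvKeyOf c with _ | k <;> rw [hK] at hc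
      · simp at hc
      rcases hM : PySem.Dict.get? pvCount c with _ | m <;> rw [hM] at hc
      · simp at hc
      have hrest : rest.length ≤ n := by
        simp only [List.length_cons] at hlen; omega
      -- the inner while (takeWhile/dropWhile) against pvSpecF threaded with (some k)
      have inner : ∀ (ds : List Char), ds.length ≤ rest.length → (∀ c ∈ ds, c ∈ pvAlphabet) →
          pvSpecF (some k) ds =
            (ds.takeWhile (fun d => PySem.Dict.get? pvKeyOf d == some k)).flatMap
              (fun d => '_' :: List.replicate ((PySem.Dict.get? pvCount d).getD 0) k) ++
            pvLoopB (ds.dropWhile (fun d => PySem.Dict.get? pvKeyOf d == some k)) := by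
        intro ds
        induction ds with
        | nil => intro _ _; simp [pvSpecF, pvLoopB]
        | cons d ds ihd =>
          intro hdlen hdall
          by_cases hd : (PySem.Dict.get? pvKeyOf d == some k) = true
          · have hkd : PySem.Dict.get? pvKeyOf d = some k := by simpa using hd
            have hds : ds.length ≤ rest.length := by
              simp only [List.length_cons] at hdlen; omega
            rw [show pvSpecF (some k) (d :: ds) =
                (if PySem.Dict.get? pvKeyOf d == some k then ['_'] else []) ++
                List.replicate ((PySem.Dict.get? pvCount d).getD 0)
                  ((PySem.Dict.get? pvKeyOf d).getD '?') ++
                pvSpecF (PySem.Dict.get? pvKeyOf d) ds from rfl]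
            rw [hkd, ihd hds (fun x hx => hdall x (by simp [hx]))]
            simp [hd]
          · have hlen' : (d :: ds).length ≤ n := le_trans hdlen hrest
            have hdf : (PySem.Dict.get? pvKeyOf d == some k) = false := by
              simpa using hd
            rw [← ih (d :: ds) hlen' hdall (some k)
              (by intro x hx; simp at hx; subst hx; simpa using hd)]
            simp [hdf]
      -- assemble the run
      have hfalse : (PySem.Dict.get? pvKeyOf c == prev) = false := hne c rfl
      conv_lhs => rw [pvLoopB]
      simp only [hK]
      rw [show pvSpecF prev (c :: rest) =
          (if PySem.Dict.get? pvKeyOf c == prev then ['_'] else []) ++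
          List.replicate ((PySem.Dict.get? pvCount c).getD 0)
            ((PySem.Dict.get? pvKeyOf c).getD '?') ++
          pvSpecF (PySem.Dict.get? pvKeyOf c) rest from rfl]
      rw [hfalse, hK, hM]
      rw [inner rest le_rfl (fun x hx => hall x (by simp [hx]))]
      rw [pvRenderRun, List.map_cons, join_underscore_cons]
      have hmap : ∀ run : List Char,
          (run.map (fun c => List.replicate ((PySem.Dict.get? pvCount c).getD 0)
              ((some k).getD '?'))).flatMap (fun y => '_' :: y)
          = run.flatMap (fun d => '_' :: List.replicate ((PySem.Dict.get? pvCount d).getD 0) k) := by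
        intro run; rw [List.flatMap_map]; rfl
      rw [hmap]
      simp [hM]

-- ===== VERDICT (by name: the statement is the Claim_ definition above) =====
theorem type_on_phone_spec : Claim_equal_type_on_phone := by
  intro msg _ hpre
  have hall : ∀ c ∈ msg.toList, c ∈ pvAlphabet := by
    unfold Pre_type_on_phone at hpre
    simpa [pvAlphabet, List.all_eq_true] using hpre
  have hside : ∀ c, msg.toList.head? = some c →
      (PySem.Dict.get? pvKeyOf c == (none : Option Char)) = false := by
    intro c hch
    have hm : c ∈ msg.toList := by
      cases h : msg.toList with
      | nil => rw [h] at hch; simp at hch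
      | cons a l => rw [h] at hch; simp at hch; simp [hch]
    have hc := pvCharOK_all c (hall c hm)
    unfold pvCharOK at hc
    rcases hK : PySem.Dict.get? pvKeyOf c with _ | k <;> rw [hK] at hc <;> simp at hc ⊢
  unfold Spec_type_on_phone type_on_phone type_on_phone_alt
  rw [loopA_spec msg.toList hall [] none (Or.inl ⟨rfl, rfl⟩),
      loopB_spec msg.toList.length msg.toList le_rfl hall none hside]
  simp
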